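-- pv_equiv track=rewrite | github.com/Coding-Sweet-Potato/YoungMin | 5week/funny_string.py | funnyString
-- ===== SOURCE A (Python) =====
-- def funnyString(s):
--     ord_s = list(map(lambda x: ord(x),s))
--     rev_ord_s = list(map(lambda x: ord(x),s[::-1]))
--     for i in range(len(ord_s)):
--         if i == len(ord_s)-1:
--             break
--         if abs(ord_s[i+1] - ord_s[i]) != abs(rev_ord_s[i+1] - rev_ord_s[i]):
--             return "Not Funny"
--     return "Funny"
-- ===== SOURCE B (Python) =====
-- def funnyString(s):
--     i, j = 1, len(s) - 1
--     while i < j: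
--         if abs(ord(s[i]) - ord(s[i - 1])) != abs(ord(s[j]) - ord(s[j - 1])):
--             return "Not Funny"
--         i += 1
--         j -= 1
--     return "Funny"
-- ===== Notes on version B (the rewrite author's own statement) =====
-- stated objective: alternative
-- what changed: B drops A's two materialized ord lists (original and reversed) and its full-length scan, instead walking two index pointers inward from both ends of the string, comparing each adjacent difference with its mirror and stopping at the middle (or at the first mismatch).
import Mathlib
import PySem

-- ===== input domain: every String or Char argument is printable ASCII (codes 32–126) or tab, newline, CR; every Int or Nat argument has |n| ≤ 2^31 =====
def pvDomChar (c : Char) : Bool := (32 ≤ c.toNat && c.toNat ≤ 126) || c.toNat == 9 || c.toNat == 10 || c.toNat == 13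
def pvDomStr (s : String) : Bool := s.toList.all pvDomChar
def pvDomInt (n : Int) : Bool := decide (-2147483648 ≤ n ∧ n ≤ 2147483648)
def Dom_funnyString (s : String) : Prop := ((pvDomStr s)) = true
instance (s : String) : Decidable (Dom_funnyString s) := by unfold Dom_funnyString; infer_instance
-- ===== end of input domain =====

-- B replaces A's two ord lists and full-length indexed scan by a two-pointer loop meeting in the middle, comparing mirrored adjacent differences directly on the string (alternative decomposition: no intermediate lists, scan stops at the middle).


-- ===== PORT A =====
-- the for-loop over range(len(ord_s)) with its break / early return, step for step
def funnyLoop (os rs : List Int) : List Nat → String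
  | [] => "Funny"
  | i :: rest =>
    if i = os.length - 1 then "Funny"
    else if |os.getD (i+1) 0 - os.getD i 0| ≠ |rs.getD (i+1) 0 - rs.getD i 0| then "Not Funny"
    else funnyLoop os rs rest

def funnyString (s : String) : String :=
  let ord_s := s.toList.map (fun c => (c.toNat : Int))
  let rev_ord_s := (s.toList.reverse).map (fun c => (c.toNat : Int))
  funnyLoop ord_s rev_ord_s (List.range ord_s.length)

-- ===== PORT B =====
-- ord(s[k]) for an Int index k; B only indexes with 0 ≤ k < len(s), where getD/toNat are exact
def bChord (cs : List Char) (z : Int) : Int := ((cs.getD z.toNat ' ').toNat : Int)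

-- the while i < j loop of Source B, step for step
def funnyAltLoop (cs : List Char) (i j : Int) : String :=
  if i < j then
    if |bChord cs i - bChord cs (i-1)| ≠ |bChord cs j - bChord cs (j-1)| then "Not Funny"
    else funnyAltLoop cs (i+1) (j-1)
  else "Funny"
termination_by (j - i).toNat
decreasing_by omega

def funnyString_alt (s : String) : String :=
  funnyAltLoop s.toList 1 ((s.toList.length : Int) - 1)

-- ===== PRECONDITION & SPEC =====
def Spec_funnyString (s : String) (out : String) : Prop := out = funnyString_alt s
instance (s : String) (out : String) : Decidable (Spec_funnyString s out) := by unfold Spec_funnyString; infer_instance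

-- ===== CLAIM (what is proved, stated in full; the proofs are below) =====
def Claim_equal_funnyString : Prop := ∀ (s : String), Dom_funnyString s → Spec_funnyString s (funnyString s)

-- ===== LEMMAS AND PROOFS =====

theorem loop_funny (os rs : List Int) (ixs : List Nat) :
    funnyLoop os rs ixs =
      if ∀ i ∈ ixs.takeWhile (fun i => decide (i ≠ os.length - 1)),
          |os.getD (i+1) 0 - os.getD i 0| = |rs.getD (i+1) 0 - rs.getD i 0|
      then "Funny" else "Not Funny" := by
  induction ixs with
  | nil => simp [funnyLoop]
  | cons i rest ih =>
    by_cases h1 : i = os.length - 1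
    · simp [funnyLoop, h1, List.takeWhile]
    · by_cases h2 : |os.getD (i+1) 0 - os.getD i 0| = |rs.getD (i+1) 0 - rs.getD i 0|
      · simp only [List.getD] at h2
        simp [funnyLoop, List.getD, h1, h2, List.takeWhile, ih]
      · simp only [List.getD] at h2
        simp [funnyLoop, List.getD, h1, h2, List.takeWhile]

theorem takeWhile_range (n : Nat) :
    (List.range n).takeWhile (fun i => decide (i ≠ n - 1)) = List.range (n - 1) := by
  cases n with
  | zero => simp
  | succ m =>
    have h0 : List.range (m+1) = List.range m ++ [m] := by simp [List.range_succ]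
    have htw : (List.range m).takeWhile (fun i => decide (i ≠ m+1-1)) = List.range m := by
      rw [List.takeWhile_eq_self_iff]
      intro x hx
      simp only [List.mem_range] at hx
      simp; omega
    rw [h0, List.takeWhile_append, htw]
    simp

theorem altLoop_cases (cs : List Char) : ∀ (fuel : Nat) (i j : Int), (j - i).toNat ≤ fuel →
    funnyAltLoop cs i j = "Funny" ∨ funnyAltLoop cs i j = "Not Funny" := by
  intro fuel
  induction fuel with
  | zero =>
    intro i j h
    rw [funnyAltLoop, if_neg (by omega : ¬ i < j)]
    left; rfl
  | succ m ih =>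
    intro i j h
    by_cases hij : i < j
    · rw [funnyAltLoop, if_pos hij]
      by_cases h0 : |bChord cs i - bChord cs (i-1)| = |bChord cs j - bChord cs (j-1)|
      · rw [if_neg (fun hne => hne h0)]
        exact ih (i+1) (j-1) (by omega)
      · rw [if_pos h0]; right; rfl
    · rw [funnyAltLoop, if_neg hij]; left; rfl

theorem altLoop_funny_iff (cs : List Char) : ∀ (fuel : Nat) (i j : Int), (j - i).toNat ≤ fuel →
    (funnyAltLoop cs i j = "Funny" ↔ ∀ t : Int, 0 ≤ t → i + t < j - t →
        |bChord cs (i+t) - bChord cs (i+t-1)| = |bChord cs (j-t) - bChord cs (j-t-1)|) := by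
  intro fuel
  induction fuel with
  | zero =>
    intro i j h
    rw [funnyAltLoop, if_neg (by omega : ¬ i < j)]
    constructor
    · intro _ t ht hlt; exfalso; omega
    · intro _; rfl
  | succ m ih =>
    intro i j h
    by_cases hij : i < j
    · rw [funnyAltLoop, if_pos hij]
      by_cases h0 : |bChord cs i - bChord cs (i-1)| = |bChord cs j - bChord cs (j-1)|
      · rw [if_neg (fun hne => hne h0), ih (i+1) (j-1) (by omega)]
        constructor
        · intro hall t ht hlt
          rcases eq_or_lt_of_le ht with h' | h'
          · rw [← h']
            simpa using h0
          · have hx := hall (t-1) (by omega) (by omega)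
            have e1 : (i+1) + (t-1) = i + t := by ring
            have e2 : (j-1) - (t-1) = j - t := by ring
            rw [e1, e2] at hx; exact hx
        · intro hall t ht hlt
          have hx := hall (t+1) (by omega) (by omega)
          have e1 : i + (t+1) = (i+1) + t := by ring
          have e2 : j - (t+1) = (j-1) - t := by ring
          rw [e1, e2] at hx; exact hx
      · rw [if_pos h0]
        constructor
        · intro hbad; exact absurd hbad (by decide)
        · intro hall; exfalso
          have hx := hall 0 le_rfl (by omega)
          simp only [add_zero, sub_zero] at hx
          exact h0 hx
    · rw [funnyAltLoop, if_neg hij]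
      constructor
      · intro _ t ht hlt; exfalso; omega
      · intro _; rfl

theorem getD_os (cs : List Char) (k : Nat) (h : k < cs.length) :
    (cs.map (fun c => (c.toNat : Int))).getD k 0 = ((cs.getD k ' ').toNat : Int) := by
  rw [List.getD_eq_getElem _ _ (by simpa using h), List.getD_eq_getElem _ _ h]
  simp

theorem getD_rev (cs : List Char) (k : Nat) (h : k < cs.length) :
    (cs.reverse.map (fun c => (c.toNat : Int))).getD k 0 =
      ((cs.getD (cs.length - 1 - k) ' ').toNat : Int) := by
  rw [List.getD_eq_getElem _ _ (by simpa using h),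
      List.getD_eq_getElem _ _ (by omega)]
  simp [List.getElem_reverse]

-- ===== VERDICT (by name: the statement is the Claim_ definition above) =====
theorem funnyString_spec : Claim_equal_funnyString := by
  intro s _
  show funnyString s = funnyString_alt s
  unfold funnyString funnyString_alt
  rw [loop_funny, takeWhile_range]
  set cs := s.toList with hcs
  set n := cs.length with hn
  simp only [List.length_map]
  have hiff := altLoop_funny_iff cs ((((n : Int) - 1) - 1).toNat) 1 ((n : Int) - 1) le_rfl
  have hcases := altLoop_cases cs ((((n : Int) - 1) - 1).toNat) 1 ((n : Int) - 1) le_rfl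
  have bridge :
      (∀ i ∈ List.range (n - 1),
          |(cs.map (fun c => (c.toNat : Int))).getD (i+1) 0 - (cs.map (fun c => (c.toNat : Int))).getD i 0| =
          |(cs.reverse.map (fun c => (c.toNat : Int))).getD (i+1) 0 - (cs.reverse.map (fun c => (c.toNat : Int))).getD i 0|) ↔
      (∀ t : Int, 0 ≤ t → 1 + t < ((n : Int) - 1) - t →
          |bChord cs (1+t) - bChord cs (1+t-1)| = |bChord cs (((n : Int) - 1)-t) - bChord cs (((n : Int) - 1)-t-1)|) := by
    constructor
    · intro hall t ht hlt
      set k := t.toNat with hkdef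
      have hkn : 2 * k + 2 < n := by omega
      have hx := hall k (by simp only [List.mem_range]; omega)
      rw [getD_os cs (k+1) (by omega), getD_os cs k (by omega),
          getD_rev cs (k+1) (by omega), getD_rev cs k (by omega)] at hx
      have e1 : (1 + t).toNat = k + 1 := by omega
      have e2 : (1 + t - 1).toNat = k := by omega
      have e3 : ((n : Int) - 1 - t).toNat = n - 1 - k := by omega
      have e4 : ((n : Int) - 1 - t - 1).toNat = n - 2 - k := by omega
      simp only [bChord, e1, e2, e3, e4]
      have e5 : n - 1 - (k + 1) = n - 2 - k := by omega
      rw [e5] at hx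
      rw [hx, abs_sub_comm]
    · intro hall i hi
      simp only [List.mem_range] at hi
      rw [getD_os cs (i+1) (by omega), getD_os cs i (by omega),
          getD_rev cs (i+1) (by omega), getD_rev cs i (by omega)]
      have e5 : n - 1 - (i + 1) = n - 2 - i := by omega
      rw [e5]
      have half : ∀ k : Nat, 2 * k + 2 < n →
          |((cs.getD (k+1) ' ').toNat : Int) - ((cs.getD k ' ').toNat : Int)| =
          |((cs.getD (n-1-k) ' ').toNat : Int) - ((cs.getD (n-2-k) ' ').toNat : Int)| := by
        intro k hk
        have hx := hall (k : Int) (by omega) (by omega)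
        have e1 : (1 + (k : Int)).toNat = k + 1 := by omega
        have e2 : (1 + (k : Int) - 1).toNat = k := by omega
        have e3 : ((n : Int) - 1 - (k : Int)).toNat = n - 1 - k := by omega
        have e4 : ((n : Int) - 1 - (k : Int) - 1).toNat = n - 2 - k := by omega
        simp only [bChord, e1, e2, e3, e4] at hx
        exact hx
      by_cases hcase : 2 * i + 2 < n
      · rw [half i hcase, abs_sub_comm]
      · by_cases heq : i = n - 2 - i
        · rw [← heq, abs_sub_comm]
          have e6 : n - 1 - i = i + 1 := by omega
          rw [e6]
        · have hk : 2 * (n - 2 - i) + 2 < n := by omega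
          have hx := half (n - 2 - i) hk
          have e6 : n - 2 - (n - 2 - i) = i := by omega
          have e7 : n - 1 - (n - 2 - i) = i + 1 := by omega
          rw [e6, e7] at hx
          rw [← hx, abs_sub_comm]
          have e8 : cs.length - 1 - i = n - 2 - i + 1 := by omega
          rw [e8]
  split_ifs with hA
  · exact (hiff.mpr (bridge.mp hA)).symm
  · rcases hcases with hB | hB
    · exact absurd (bridge.mpr (hiff.mp hB)) hA
    · exact hB.symm
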